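-- pv_equiv track=rewrite | github.com/jaychsu/algorithm | other/unique_paths_with_followups.py | unique_paths_from_three_dir2_1_1
-- ===== SOURCE A (Python) =====
-- def unique_paths_from_three_dir2_1_1(m, n, points):
--     """
--     :type m: int
--     :type n: int
--     :type points: list[list[int]]
--     :rtype: int
--
--     >>> unique_paths_from_three_dir2_1_1(2, 3, [[1, 0], [1, 1], [1, 2]])
--     0
--     >>> unique_paths_from_three_dir2_1_1(3, 3, [[1, 0], [2, 1], [1, 2]])
--     0
--     >>> unique_paths_from_three_dir2_1_1(5, 5, [[0, 1], [2, 2], [1, 3]])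
--     0
--     >>> unique_paths_from_three_dir2_1_1(5, 5, [[1, 1], [2, 2], [1, 3]])
--     1
--     >>> unique_paths_from_three_dir2_1_1(5, 5, [[2, 2], [1, 1], [1, 3]])
--     1
--     """
--     if not m or not n or not points:
--         return 0
--
--     points = sorted(
--         [p for p in points if p[1] != 0],
--         key=lambda p: (p[1], p[0])
--     )
--
--     if len(points) != 3:
--         return 0
--
--     dp = [[0] * n for _ in range(m)]
--     dp[0][0] = 1
--     pi = 0
--
--     for y in range(1, n):
--         for x in range(m):
--             dp[x][y] = dp[x][y - 1]
--
--             if x > 0: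
--                 dp[x][y] += dp[x - 1][y - 1]
--
--             if x + 1 < m:
--                 dp[x][y] += dp[x + 1][y - 1]
--
--         if pi < 3:
--             for x in range(m):
--                 if x != points[pi][0]:
--                     dp[x][y] = 0
--             pi += 1
--
--     return dp[0][n - 1]
-- ===== SOURCE B (Python) =====
-- def unique_paths_from_three_dir2_1_1(m, n, points):
--     if not m or not n or not points:
--         return 0
--
--     pts = sorted(
--         [p for p in points if p[1] != 0],
--         key=lambda p: (p[1], p[0])
--     )
--
--     if len(pts) != 3:
--         return 0
--
--     # Phase 1: the forced columns 1..min(n-1, 3) admit a single row each;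
--     # walk them with adjacency/bounds checks.
--     row = 0
--     k = min(n - 1, 3)
--     for i in range(k):
--         r = pts[i][0]
--         if not (0 <= r < m and abs(r - row) <= 1):
--             return 0
--         row = r
--
--     # Phase 2: free columns k+1..n-1 — a 1-D bounded-walk DP from the last
--     # forced row; answer is the count landing back on row 0.
--     dp = [0] * m
--     dp[row] = 1
--     for _ in range(k + 1, n):
--         dp = [sum(dp[x + d] for d in (-1, 0, 1) if 0 <= x + d < m)
--               for x in range(m)]
--     return dp[0]
-- ===== Notes on version B (the rewrite author's own statement) =====
-- stated objective: alternative
-- what changed: A fills a full m x n 2-D DP table column by column, zeroing each of the first three columns to the forced row; B decomposes the problem into an O(1)-per-step adjacency walk over the (at most three) forced columns followed by a 1-D O(m)-space bounded-walk DP over the remaining free columns.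
import Mathlib
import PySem

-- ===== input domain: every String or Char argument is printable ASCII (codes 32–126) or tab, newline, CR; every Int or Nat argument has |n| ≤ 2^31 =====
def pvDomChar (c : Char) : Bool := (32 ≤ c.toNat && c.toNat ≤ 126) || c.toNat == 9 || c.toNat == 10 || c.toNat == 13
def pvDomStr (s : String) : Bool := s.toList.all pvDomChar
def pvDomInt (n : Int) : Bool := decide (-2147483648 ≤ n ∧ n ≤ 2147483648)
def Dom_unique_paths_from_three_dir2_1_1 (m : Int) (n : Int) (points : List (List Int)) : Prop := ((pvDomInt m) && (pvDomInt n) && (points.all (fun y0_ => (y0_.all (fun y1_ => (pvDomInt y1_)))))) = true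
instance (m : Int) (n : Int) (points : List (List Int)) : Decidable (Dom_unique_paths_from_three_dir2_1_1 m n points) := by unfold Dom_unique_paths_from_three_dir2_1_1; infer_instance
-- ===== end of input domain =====

-- B replaces A's m×n 2-D DP table by a forced-column adjacency walk followed by a 1-D
-- bounded-walk DP over the free columns (objective: alternative decomposition, O(m) space).

-- ===== PORT A =====
-- shared preprocessing of both Pythons: sorted([p for p in points if p[1] != 0], key=lambda p: (p[1], p[0]))
def pvPrep (points : List (List Int)) : List (List Int) :=
  PySem.List.sorted2 (points.filter (fun p => PySem.List.pyGetD p 1 0 != 0))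
    (fun p => PySem.List.pyGetD p 1 0) (fun p => PySem.List.pyGetD p 0 0)

-- dp[x][y] reads / writes (indices are Nat: Python only uses 0 ≤ x < m, 0 ≤ y < n here)
def pvGet2 (dp : List (List Int)) (x y : Nat) : Int := (dp.getD x []).getD y 0

def pvSet2 (dp : List (List Int)) (x y : Nat) (v : Int) : List (List Int) :=
  dp.set x ((dp.getD x []).set y v)

-- inner 'for x in range(m)' of A: dp[x][y] = dp[x][y-1] (+ dp[x-1][y-1]) (+ dp[x+1][y-1])
def pvStepA (M y : Nat) (dp0 : List (List Int)) : List (List Int) :=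
  (List.range M).foldl (fun dp x =>
    let v := pvGet2 dp x (y - 1)
    let v := if 0 < x then v + pvGet2 dp (x - 1) (y - 1) else v
    let v := if x + 1 < M then v + pvGet2 dp (x + 1) (y - 1) else v
    pvSet2 dp x y v) dp0

-- 'for x in range(m): if x != points[pi][0]: dp[x][y] = 0'
def pvZeroA (M y : Nat) (r : Int) (dp0 : List (List Int)) : List (List Int) :=
  (List.range M).foldl (fun dp (x : Nat) => if (x : Int) ≠ r then pvSet2 dp x y 0 else dp) dp0

-- one iteration of A's 'for y in range(1, n)' loop, state (dp, pi)
def pvOuterA (M : Nat) (pts : List (List Int)) (st : List (List Int) × Nat) (y : Int) :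
    List (List Int) × Nat :=
  let dp := pvStepA M y.toNat st.1
  if st.2 < 3 then
    (pvZeroA M y.toNat (PySem.List.pyGetD (PySem.List.pyGetD pts (st.2 : Int) []) 0 0) dp, st.2 + 1)
  else (dp, st.2)

def unique_paths_from_three_dir2_1_1 (m : Int) (n : Int) (points : List (List Int)) : Int :=
  if m = 0 ∨ n = 0 ∨ points = [] then 0
  else
    let pts := pvPrep points
    if pts.length ≠ 3 then 0
    else
      let dp0 := pvSet2 (List.replicate m.toNat (List.replicate n.toNat (0 : Int))) 0 0 1
      let st := (PySem.List.pyRange 1 n).foldl (pvOuterA m.toNat pts) (dp0, 0)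
      pvGet2 st.1 0 (n.toNat - 1)

-- ===== PORT B =====
-- one forced step of B's phase-1 loop (early 'return 0' becomes the none state)
def pvForcedB (m : Int) (pts : List (List Int)) (o : Option Int) (i : Int) : Option Int :=
  match o with
  | none => none
  | some row =>
    let r := PySem.List.pyGetD (PySem.List.pyGetD pts i []) 0 0
    if 0 ≤ r ∧ r < m ∧ (r - row).natAbs ≤ 1 then some r else none

-- B's phase-2 comprehension: sum of the in-bounds neighbours of the previous column
def pvFreeB (M : Nat) (dp : List Int) : List Int :=
  (List.range M).map (fun x =>
    (if 0 < x then dp.getD (x - 1) 0 else 0) + dp.getD x 0 +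
      (if x + 1 < M then dp.getD (x + 1) 0 else 0))

def unique_paths_from_three_dir2_1_1_alt (m : Int) (n : Int) (points : List (List Int)) : Int :=
  if m = 0 ∨ n = 0 ∨ points = [] then 0
  else
    let pts := pvPrep points
    if pts.length ≠ 3 then 0
    else
      let k := min (n - 1) 3
      match (PySem.List.pyRange 0 k).foldl (pvForcedB m pts) (some 0) with
      | none => 0
      | some row =>
        let dp0 := (List.replicate m.toNat (0 : Int)).set row.toNat 1
        let dp := (PySem.List.pyRange (k + 1) n).foldl (fun dp _ => pvFreeB m.toNat dp) dp0
        PySem.List.pyGetD dp 0 0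

-- ===== PRECONDITION & SPEC =====
-- Pre_ excludes exactly the inputs where the Python A raises: a point of length < 2
-- (IndexError in the filter's p[1]), or m < 0 / n < 0 reaching the dp table when exactly
-- three points survive the filter (IndexError on dp[0][0]).
def Pre_unique_paths_from_three_dir2_1_1 (m : Int) (n : Int) (points : List (List Int)) : Prop :=
  m = 0 ∨ n = 0 ∨ points = [] ∨
    ((∀ p ∈ points, 2 ≤ p.length) ∧
      (points.countP (fun p => PySem.List.pyGetD p 1 0 != 0) ≠ 3 ∨ (1 ≤ m ∧ 1 ≤ n)))
instance (m : Int) (n : Int) (points : List (List Int)) : Decidable (Pre_unique_paths_from_three_dir2_1_1 m n points) := by unfold Pre_unique_paths_from_three_dir2_1_1; infer_instance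

def pvWitness_unique_paths_from_three_dir2_1_1 : Int × Int × List (List Int) :=
  (5, 5, [[1, 1], [2, 2], [1, 3]])

def Spec_unique_paths_from_three_dir2_1_1 (m : Int) (n : Int) (points : List (List Int)) (out : Int) : Prop := out = unique_paths_from_three_dir2_1_1_alt m n points
instance (m : Int) (n : Int) (points : List (List Int)) (out : Int) : Decidable (Spec_unique_paths_from_three_dir2_1_1 m n points out) := by unfold Spec_unique_paths_from_three_dir2_1_1; infer_instance

-- ===== CLAIM (what is proved, stated in full; the proofs are below) =====
def Claim_equal_unique_paths_from_three_dir2_1_1 : Prop := ∀ (m : Int) (n : Int) (points : List (List Int)), Dom_unique_paths_from_three_dir2_1_1 m n points → Pre_unique_paths_from_three_dir2_1_1 m n points → Spec_unique_paths_from_three_dir2_1_1 m n points (unique_paths_from_three_dir2_1_1 m n points)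

-- ===== LEMMAS AND PROOFS =====

-- mathematical description of column j of A's dp table (M rows, forced rows rs)
def pvStepf (M : Nat) (c : Nat → Int) (x : Nat) : Int :=
  c x + (if 0 < x then c (x - 1) else 0) + (if x + 1 < M then c (x + 1) else 0)

def pvColC (M : Nat) (rs : List Int) : Nat → Nat → Int
  | 0 => fun x => if x = 0 then 1 else 0
  | j + 1 => fun x =>
      if j < 3 then (if (x : Int) = rs.getD j 0 then pvStepf M (pvColC M rs j) x else 0)
      else pvStepf M (pvColC M rs j) x

def pvShape (M N : Nat) (dp : List (List Int)) : Prop :=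
  dp.length = M ∧ ∀ row ∈ dp, row.length = N

theorem pvShape_row_len {M N : Nat} {dp : List (List Int)} (h : pvShape M N dp)
    {x : Nat} (hx : x < M) : (dp.getD x []).length = N := by
  obtain ⟨hL, hrows⟩ := h
  have hx' : x < dp.length := by omega
  rw [List.getD_eq_getElem?_getD, List.getElem?_eq_getElem hx']
  exact hrows _ (List.getElem_mem hx')

theorem pvGet2_pvSet2 {dp : List (List Int)} {x y : Nat} {v : Int}
    (hx : x < dp.length) (hy : y < (dp.getD x []).length) (x' y' : Nat) :
    pvGet2 (pvSet2 dp x y v) x' y' = if x' = x ∧ y' = y then v else pvGet2 dp x' y' := by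
  unfold pvGet2 pvSet2
  rw [List.getD_eq_getElem?_getD (l := dp.set x _), List.getElem?_set]
  rcases eq_or_ne x' x with rfl | hx'
  · rw [if_pos rfl, if_pos hx]
    show (((dp.getD x' []).set y v).getD y' 0) = _
    rw [List.getD_eq_getElem?_getD (l := (dp.getD x' []).set y v), List.getElem?_set]
    rcases eq_or_ne y' y with rfl | hy'
    · rw [if_pos rfl, if_pos hy]
      simp
    · rw [if_neg (Ne.symm hy'), ← List.getD_eq_getElem?_getD]
      simp [hy']
  · rw [if_neg (Ne.symm hx'), ← List.getD_eq_getElem?_getD]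
    simp [hx']

theorem pvShape_pvSet2 {M N : Nat} {dp : List (List Int)} (h : pvShape M N dp)
    (x y : Nat) (v : Int) : pvShape M N (pvSet2 dp x y v) := by
  obtain ⟨hL, hrows⟩ := h
  by_cases hx : x < dp.length
  · refine ⟨by simp [pvSet2, hL], ?_⟩
    intro row hrow
    rcases List.mem_or_eq_of_mem_set hrow with hmem | heq
    · exact hrows _ hmem
    · subst heq
      rw [List.length_set]
      exact pvShape_row_len ⟨hL, hrows⟩ (by omega)
  · unfold pvSet2
    rw [List.set_eq_of_length_le (by omega)]
    exact ⟨hL, hrows⟩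

theorem pvStepf_congr {M : Nat} {c1 c2 : Nat → Int} (h : ∀ s, s < M → c1 s = c2 s)
    {x : Nat} (hx : x < M) : pvStepf M c1 x = pvStepf M c2 x := by
  unfold pvStepf
  rw [h x hx]
  by_cases h0 : 0 < x
  · rw [if_pos h0, if_pos h0, h (x - 1) (by omega)]
    by_cases h1 : x + 1 < M
    · rw [if_pos h1, if_pos h1, h (x + 1) (by omega)]
    · rw [if_neg h1, if_neg h1]
  · rw [if_neg h0, if_neg h0]
    by_cases h1 : x + 1 < M
    · rw [if_pos h1, if_pos h1, h (x + 1) (by omega)]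
    · rw [if_neg h1, if_neg h1]

def pvStepAF (M y : Nat) : List (List Int) → Nat → List (List Int) :=
  fun dp x =>
    let v := pvGet2 dp x (y - 1)
    let v := if 0 < x then v + pvGet2 dp (x - 1) (y - 1) else v
    let v := if x + 1 < M then v + pvGet2 dp (x + 1) (y - 1) else v
    pvSet2 dp x y v

theorem pvStepA_aux {M N y : Nat} {dp0 : List (List Int)} (hsh : pvShape M N dp0)
    (hy0 : y ≠ 0) (hy : y < N) :
    ∀ t, t ≤ M →
      pvShape M N ((List.range t).foldl (pvStepAF M y) dp0) ∧
      (∀ x j, j ≠ y → pvGet2 ((List.range t).foldl (pvStepAF M y) dp0) x j = pvGet2 dp0 x j) ∧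
      (∀ x, x < t → pvGet2 ((List.range t).foldl (pvStepAF M y) dp0) x y =
        pvStepf M (fun s => pvGet2 dp0 s (y - 1)) x) ∧
      (∀ x, t ≤ x → pvGet2 ((List.range t).foldl (pvStepAF M y) dp0) x y = pvGet2 dp0 x y) := by
  intro t
  induction t with
  | zero =>
    intro _
    simp only [List.range_zero, List.foldl_nil]
    exact ⟨hsh, fun _ _ _ => trivial, fun x hx => absurd hx (Nat.not_lt_zero x), fun _ _ => trivial⟩
  | succ t ih =>
    intro ht
    obtain ⟨S, U, P, Q⟩ := ih (by omega)
    set dp := (List.range t).foldl (pvStepAF M y) dp0 with hdp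
    have htM : t < M := by omega
    have hlen : t < dp.length := by rw [S.1]; exact htM
    have hrow : y < (dp.getD t []).length := by rw [pvShape_row_len S htM]; exact hy
    rw [List.range_succ, List.foldl_append]
    simp only [List.foldl_cons, List.foldl_nil]
    have hval : pvStepAF M y dp t = pvSet2 dp t y (pvStepf M (fun s => pvGet2 dp0 s (y - 1)) t) := by
      simp only [pvStepAF, pvStepf]
      rw [U t (y - 1) (by omega), U (t - 1) (y - 1) (by omega), U (t + 1) (y - 1) (by omega)]
      split_ifs <;> ring_nf
    rw [hval]
    refine ⟨pvShape_pvSet2 S _ _ _, ?_, ?_, ?_⟩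
    · intro x j hj
      rw [pvGet2_pvSet2 hlen hrow, if_neg (by tauto), U x j hj]
    · intro x hx
      rw [pvGet2_pvSet2 hlen hrow]
      rcases eq_or_ne x t with rfl | hxt
      · rw [if_pos ⟨rfl, rfl⟩]
      · rw [if_neg (by tauto)]
        exact P x (by omega)
    · intro x hx
      rw [pvGet2_pvSet2 hlen hrow, if_neg (by omega)]
      exact Q x (by omega)

theorem pvStepA_spec {M N y : Nat} {dp0 : List (List Int)} (hsh : pvShape M N dp0)
    (hy0 : y ≠ 0) (hy : y < N) :
    pvShape M N (pvStepA M y dp0) ∧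
    (∀ x j, j ≠ y → pvGet2 (pvStepA M y dp0) x j = pvGet2 dp0 x j) ∧
    (∀ x, x < M → pvGet2 (pvStepA M y dp0) x y = pvStepf M (fun s => pvGet2 dp0 s (y - 1)) x) := by
  have hA : pvStepA M y dp0 = (List.range M).foldl (pvStepAF M y) dp0 := rfl
  obtain ⟨S, U, P, _⟩ := pvStepA_aux hsh hy0 hy M le_rfl
  rw [hA]
  exact ⟨S, U, P⟩

theorem pvZeroA_aux {M N y : Nat} {r : Int} {dp0 : List (List Int)} (hsh : pvShape M N dp0)
    (hy : y < N) :
    ∀ t, t ≤ M →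
      pvShape M N ((List.range t).foldl
        (fun dp (x : Nat) => if (x : Int) ≠ r then pvSet2 dp x y 0 else dp) dp0) ∧
      (∀ x j, j ≠ y → pvGet2 ((List.range t).foldl
        (fun dp (x : Nat) => if (x : Int) ≠ r then pvSet2 dp x y 0 else dp) dp0) x j =
          pvGet2 dp0 x j) ∧
      (∀ x, x < t → pvGet2 ((List.range t).foldl
        (fun dp (x : Nat) => if (x : Int) ≠ r then pvSet2 dp x y 0 else dp) dp0) x y =
          if (x : Int) = r then pvGet2 dp0 x y else 0) ∧
      (∀ x, t ≤ x → pvGet2 ((List.range t).foldl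
        (fun dp (x : Nat) => if (x : Int) ≠ r then pvSet2 dp x y 0 else dp) dp0) x y =
          pvGet2 dp0 x y) := by
  intro t
  induction t with
  | zero =>
    intro _
    simp only [List.range_zero, List.foldl_nil]
    exact ⟨hsh, fun _ _ _ => trivial, fun x hx => absurd hx (Nat.not_lt_zero x), fun _ _ => trivial⟩
  | succ t ih =>
    intro ht
    obtain ⟨S, U, P, Q⟩ := ih (by omega)
    set dp := (List.range t).foldl
      (fun dp (x : Nat) => if (x : Int) ≠ r then pvSet2 dp x y 0 else dp) dp0 with hdp
    have htM : t < M := by omega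
    have hlen : t < dp.length := by rw [S.1]; exact htM
    have hrow : y < (dp.getD t []).length := by rw [pvShape_row_len S htM]; exact hy
    rw [List.range_succ, List.foldl_append]
    simp only [List.foldl_cons, List.foldl_nil]
    by_cases hr : (t : Int) ≠ r
    · rw [if_pos hr]
      refine ⟨pvShape_pvSet2 S _ _ _, ?_, ?_, ?_⟩
      · intro x j hj
        rw [pvGet2_pvSet2 hlen hrow, if_neg (by tauto), U x j hj]
      · intro x hx
        rw [pvGet2_pvSet2 hlen hrow]
        rcases eq_or_ne x t with rfl | hxt
        · rw [if_pos ⟨rfl, rfl⟩, if_neg hr]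
        · rw [if_neg (by tauto)]
          exact P x (by omega)
      · intro x hx
        rw [pvGet2_pvSet2 hlen hrow, if_neg (by omega)]
        exact Q x (by omega)
    · rw [if_neg hr]
      rw [not_not] at hr
      refine ⟨S, U, ?_, ?_⟩
      · intro x hx
        rcases eq_or_ne x t with rfl | hxt
        · rw [if_pos hr]
          exact Q x le_rfl
        · exact P x (by omega)
      · intro x hx
        exact Q x (by omega)

theorem pvZeroA_spec {M N y : Nat} {r : Int} {dp0 : List (List Int)} (hsh : pvShape M N dp0)
    (hy : y < N) :
    pvShape M N (pvZeroA M y r dp0) ∧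
    (∀ x j, j ≠ y → pvGet2 (pvZeroA M y r dp0) x j = pvGet2 dp0 x j) ∧
    (∀ x, x < M → pvGet2 (pvZeroA M y r dp0) x y =
      if (x : Int) = r then pvGet2 dp0 x y else 0) := by
  obtain ⟨S, U, P, _⟩ := pvZeroA_aux hsh hy (r := r) M le_rfl
  exact ⟨S, U, P⟩

theorem pvGet2_repl (M N x j : Nat) :
    pvGet2 (List.replicate M (List.replicate N (0 : Int))) x j = 0 := by
  unfold pvGet2
  rcases lt_or_ge x M with h | h
  · rw [List.getD_eq_getElem?_getD (l := List.replicate M _), List.getElem?_replicate, if_pos h]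
    show (List.replicate N (0 : Int)).getD j 0 = 0
    rw [List.getD_eq_getElem?_getD, List.getElem?_replicate]
    split_ifs <;> rfl
  · rw [List.getD_eq_getElem?_getD (l := List.replicate M _), List.getElem?_replicate,
      if_neg (by omega)]
    rfl

-- invariant of A's outer loop after processing columns 1..t
theorem pvOuterA_inv (M N : Nat) (pts : List (List Int)) (hM : 1 ≤ M) (hN : 1 ≤ N)
    (hlen : pts.length = 3) :
    ∀ t, t ≤ N - 1 →
      (pvShape M N ((PySem.List.pyRange 1 ((t : Int) + 1)).foldl (pvOuterA M pts)
          (pvSet2 (List.replicate M (List.replicate N (0 : Int))) 0 0 1, 0)).1) ∧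
      ((PySem.List.pyRange 1 ((t : Int) + 1)).foldl (pvOuterA M pts)
          (pvSet2 (List.replicate M (List.replicate N (0 : Int))) 0 0 1, 0)).2 = min t 3 ∧
      (∀ x, x < M →
        pvGet2 ((PySem.List.pyRange 1 ((t : Int) + 1)).foldl (pvOuterA M pts)
            (pvSet2 (List.replicate M (List.replicate N (0 : Int))) 0 0 1, 0)).1 x t =
          pvColC M (pts.map (fun p => PySem.List.pyGetD p 0 0)) t x) := by
  intro t
  induction t with
  | zero =>
    intro _
    have h0 : PySem.List.pyRange 1 (((0 : Nat) : Int) + 1) = [] := by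
      simp [PySem.List.pyRange]
    rw [h0]
    simp only [List.foldl_nil]
    have hbase : pvShape M N (List.replicate M (List.replicate N (0 : Int))) :=
      ⟨by simp, by intro row hrow; rw [List.eq_of_mem_replicate hrow]; simp⟩
    have hx0 : (0 : Nat) < (List.replicate M (List.replicate N (0 : Int))).length := by
      simp; omega
    have hy0 : (0 : Nat) < ((List.replicate M (List.replicate N (0 : Int))).getD 0 []).length := by
      rw [pvShape_row_len hbase (by omega)]; omega
    refine ⟨pvShape_pvSet2 hbase _ _ _, by simp, ?_⟩
    intro x hx
    rw [pvGet2_pvSet2 hx0 hy0]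
    simp only [pvColC]
    rcases eq_or_ne x 0 with rfl | hxne
    · simp
    · rw [if_neg (by tauto), if_neg hxne, pvGet2_repl]
  | succ t ih =>
    intro ht
    obtain ⟨S, Pi, C⟩ := ih (by omega)
    have hrange : PySem.List.pyRange 1 (((t + 1 : Nat) : Int) + 1) =
        PySem.List.pyRange 1 ((t : Int) + 1) ++ [(t : Int) + 1] := by
      have hcast : ((t + 1 : Nat) : Int) + 1 = ((t : Int) + 1) + 1 := by push_cast; ring
      rw [hcast]
      exact PySem.List.pyRange_one_succ_right (by omega)
    rw [hrange, List.foldl_append]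
    simp only [List.foldl_cons, List.foldl_nil]
    set st := (PySem.List.pyRange 1 ((t : Int) + 1)).foldl (pvOuterA M pts)
      (pvSet2 (List.replicate M (List.replicate N (0 : Int))) 0 0 1, 0) with hst
    have htoNat : ((t : Int) + 1).toNat = t + 1 := by omega
    obtain ⟨S1, U1, P1⟩ := pvStepA_spec (N := N) (y := t + 1) S (by omega) (by omega)
    have hcol1 : ∀ x, x < M → pvGet2 (pvStepA M (t + 1) st.1) x (t + 1) =
        pvStepf M (pvColC M (pts.map (fun p => PySem.List.pyGetD p 0 0)) t) x := by
      intro x hx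
      rw [P1 x hx]
      refine pvStepf_congr (fun s hs => ?_) hx
      simpa using C s hs
    simp only [pvOuterA, htoNat, Pi]
    by_cases ht3 : t < 3
    · have hmin : min t 3 = t := by omega
      rw [hmin, if_pos ht3]
      have hr : PySem.List.pyGetD (PySem.List.pyGetD pts ((t : Nat) : Int) []) 0 0 =
          (pts.map (fun p => PySem.List.pyGetD p 0 0)).getD t 0 := by
        rw [PySem.List.pyGetD_natCast]
        rw [List.getD_eq_getElem?_getD (l := pts.map _), List.getElem?_map]
        have htlen : t < pts.length := by omega
        rw [List.getD_eq_getElem?_getD, List.getElem?_eq_getElem htlen]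
        simp
      obtain ⟨S2, U2, P2⟩ := pvZeroA_spec (N := N) (y := t + 1)
        (r := PySem.List.pyGetD (PySem.List.pyGetD pts ((t : Nat) : Int) []) 0 0) S1 (by omega)
      refine ⟨S2, by omega, ?_⟩
      intro x hx
      rw [P2 x hx, hcol1 x hx]
      simp only [pvColC]
      rw [if_pos ht3, hr]
    · have hmin : min t 3 = 3 := by omega
      rw [hmin, if_neg (by omega)]
      refine ⟨S1, by omega, ?_⟩
      intro x hx
      rw [hcol1 x hx]
      simp only [pvColC]
      rw [if_neg ht3]

theorem pvStepf_zero {M : Nat} {c : Nat → Int} (hc : ∀ s, s < M → c s = 0) {x : Nat}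
    (hx : x < M) : pvStepf M c x = 0 := by
  unfold pvStepf
  rw [hc x hx]
  by_cases h0 : 0 < x
  · rw [if_pos h0, hc (x - 1) (by omega)]
    by_cases h1 : x + 1 < M
    · rw [if_pos h1, hc (x + 1) h1]; ring
    · rw [if_neg h1]; ring
  · rw [if_neg h0]
    by_cases h1 : x + 1 < M
    · rw [if_pos h1, hc (x + 1) h1]; ring
    · rw [if_neg h1]; ring

theorem pvStepf_ind {M : Nat} {c : Nat → Int} {row : Int}
    (hc : ∀ s, s < M → c s = if (s : Int) = row then 1 else 0)
    (hrow0 : 0 ≤ row) (hrowM : row < (M : Int)) {x : Nat} (hx : x < M) (r : Int)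
    (hxr : (x : Int) = r) :
    pvStepf M c x = if (r - row).natAbs ≤ 1 then 1 else 0 := by
  unfold pvStepf
  rw [hc x hx]
  by_cases h0 : 0 < x
  · rw [if_pos h0, hc (x - 1) (by omega)]
    have e1 : ((x - 1 : Nat) : Int) = (x : Int) - 1 := by omega
    rw [e1]
    by_cases h1 : x + 1 < M
    · rw [if_pos h1, hc (x + 1) h1]
      push_cast
      split_ifs <;> omega
    · rw [if_neg h1]
      split_ifs <;> omega
  · rw [if_neg h0]
    by_cases h1 : x + 1 < M
    · rw [if_pos h1, hc (x + 1) h1]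
      push_cast
      split_ifs <;> omega
    · rw [if_neg h1]
      split_ifs <;> omega

-- B phase 1: the forced walk computes exactly the single live row of column i
theorem pvForcedB_inv (m : Int) (M : Nat) (hm : 1 ≤ m) (hM : M = m.toNat)
    (pts : List (List Int)) (hlen : pts.length = 3) (K : Nat) (hK3 : K ≤ 3) :
    ∀ i, i ≤ K →
      (∀ row, (List.range i).foldl (fun o (s : Nat) => pvForcedB m pts o (s : Int)) (some 0) = some row →
        0 ≤ row ∧ row < m ∧ ∀ x, x < M →
          pvColC M (pts.map (fun p => PySem.List.pyGetD p 0 0)) i x =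
            if (x : Int) = row then 1 else 0) ∧
      ((List.range i).foldl (fun o (s : Nat) => pvForcedB m pts o (s : Int)) (some 0) = none →
        ∀ x, x < M → pvColC M (pts.map (fun p => PySem.List.pyGetD p 0 0)) i x = 0) := by
  have hMm : (M : Int) = m := by omega
  intro i
  induction i with
  | zero =>
    intro _
    constructor
    · intro row h
      simp only [List.range_zero, List.foldl_nil] at h
      injection h with h
      subst h
      refine ⟨le_refl 0, by omega, ?_⟩
      intro x hx
      simp only [pvColC]
      split_ifs <;> omega
    · intro h
      simp at h
  | succ i ihi =>
    intro hi
    have ih := ihi (by omega)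
    rw [List.range_succ, List.foldl_append]
    simp only [List.foldl_cons, List.foldl_nil]
    have hracc : PySem.List.pyGetD (PySem.List.pyGetD pts ((i : Nat) : Int) []) 0 0 =
        (pts.map (fun p => PySem.List.pyGetD p 0 0)).getD i 0 := by
      rw [PySem.List.pyGetD_natCast]
      rw [List.getD_eq_getElem?_getD (l := pts.map _), List.getElem?_map]
      have htlen : i < pts.length := by omega
      rw [List.getD_eq_getElem?_getD, List.getElem?_eq_getElem htlen]
      simp
    cases hold : (List.range i).foldl (fun o (s : Nat) => pvForcedB m pts o (s : Int)) (some 0) with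
    | none =>
      have hz := ih.2 hold
      constructor
      · intro row h
        simp [pvForcedB] at h
      · intro _ x hx
        simp only [pvColC]
        rw [if_pos (show i < 3 by omega)]
        split_ifs with hxe
        · exact pvStepf_zero hz hx
        · rfl
    | some row =>
      obtain ⟨hr0, hrm, hcol⟩ := ih.1 row hold
      simp only [pvForcedB]
      by_cases hcond : 0 ≤ PySem.List.pyGetD (PySem.List.pyGetD pts ((i : Nat) : Int) []) 0 0 ∧
          PySem.List.pyGetD (PySem.List.pyGetD pts ((i : Nat) : Int) []) 0 0 < m ∧
          (PySem.List.pyGetD (PySem.List.pyGetD pts ((i : Nat) : Int) []) 0 0 - row).natAbs ≤ 1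
      · rw [if_pos hcond]
        constructor
        · intro row' h
          injection h with h
          subst h
          refine ⟨hcond.1, hcond.2.1, ?_⟩
          intro x hx
          simp only [pvColC]
          rw [if_pos (show i < 3 by omega), ← hracc]
          split_ifs with hxe
          · rw [pvStepf_ind hcol hr0 (by omega) hx _ hxe, if_pos hcond.2.2]
          · rfl
        · intro h
          simp at h
      · rw [if_neg hcond]
        constructor
        · intro row' h
          simp at h
        · intro _ x hx
          simp only [pvColC]
          rw [if_pos (show i < 3 by omega), ← hracc]
          split_ifs with hxe
          · by_cases h1 : 0 ≤ PySem.List.pyGetD (PySem.List.pyGetD pts ((i : Nat) : Int) []) 0 0 ∧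
                PySem.List.pyGetD (PySem.List.pyGetD pts ((i : Nat) : Int) []) 0 0 < m
            · have hfar : ¬ (PySem.List.pyGetD (PySem.List.pyGetD pts ((i : Nat) : Int) []) 0 0
                  - row).natAbs ≤ 1 := by tauto
              rw [pvStepf_ind hcol hr0 (by omega) hx _ hxe, if_neg hfar]
            · exfalso
              exact h1 ⟨by omega, by omega⟩
          · rfl

theorem pvColC_zero_propagate {M : Nat} {rs : List Int} {j : Nat}
    (h : ∀ x, x < M → pvColC M rs j x = 0) (d : Nat) :
    ∀ x, x < M → pvColC M rs (j + d) x = 0 := by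
  induction d with
  | zero => simpa using h
  | succ d ih =>
    intro x hx
    simp only [pvColC]
    split_ifs
    · exact pvStepf_zero ih hx
    · rfl
    · exact pvStepf_zero ih hx

theorem pvFreeB_getD {M : Nat} {dp : List Int} {x : Nat} (hx : x < M) :
    (pvFreeB M dp).getD x 0 = pvStepf M (fun s => dp.getD s 0) x := by
  unfold pvFreeB
  rw [PySem.List.getD_map_range _ M x 0 hx]
  unfold pvStepf
  ring

theorem pvFreeB_iter {M : Nat} {rs : List Int} :
    ∀ (l : List Int) (dp0 : List Int) (j0 : Nat), 3 ≤ j0 →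
      (∀ x, x < M → dp0.getD x 0 = pvColC M rs j0 x) →
      ∀ x, x < M →
        (l.foldl (fun dp _ => pvFreeB M dp) dp0).getD x 0 = pvColC M rs (j0 + l.length) x := by
  intro l
  induction l with
  | nil =>
    intro dp0 j0 h3 h0 x hx
    simpa using h0 x hx
  | cons a l ih =>
    intro dp0 j0 h3 h0 x hx
    simp only [List.foldl_cons]
    have hstep : ∀ x, x < M → (pvFreeB M dp0).getD x 0 = pvColC M rs (j0 + 1) x := by
      intro x hx
      rw [pvFreeB_getD hx, pvStepf_congr (fun s hs => h0 s hs) hx]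
      simp only [pvColC]
      rw [if_neg (by omega)]
    have hres := ih (pvFreeB M dp0) (j0 + 1) (by omega) hstep x hx
    have heq : j0 + 1 + l.length = j0 + (a :: l).length := by simp; omega
    rw [heq] at hres
    exact hres

theorem pvPyRange_len (d : Nat) (a : Int) : (PySem.List.pyRange a (a + d)).length = d := by
  induction d with
  | zero => simp [PySem.List.pyRange]
  | succ d ih =>
    have hc : (a + ((d + 1 : Nat) : Int)) = (a + d) + 1 := by push_cast; ring
    rw [hc, PySem.List.pyRange_one_succ_right (by omega), List.length_append, ih]
    simp

-- ===== VERDICT (by name: the statement is the Claim_ definition above) =====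
theorem unique_paths_from_three_dir2_1_1_spec : Claim_equal_unique_paths_from_three_dir2_1_1 := by
  unfold Claim_equal_unique_paths_from_three_dir2_1_1
  intro m n points _ hpre
  unfold Spec_unique_paths_from_three_dir2_1_1
  unfold unique_paths_from_three_dir2_1_1 unique_paths_from_three_dir2_1_1_alt
  dsimp only
  by_cases hg : m = 0 ∨ n = 0 ∨ points = []
  · rw [if_pos hg, if_pos hg]
  · rw [if_neg hg, if_neg hg]
    by_cases hlen3 : (pvPrep points).length ≠ 3
    · rw [if_pos hlen3, if_pos hlen3]
    · rw [if_neg hlen3, if_neg hlen3]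
      rw [not_not] at hlen3
      have hcount : points.countP (fun p => PySem.List.pyGetD p 1 0 != 0) = 3 := by
        have hperm := (PySem.List.sorted2_perm
          (points.filter (fun p => PySem.List.pyGetD p 1 0 != 0))
          (fun p => PySem.List.pyGetD p 1 0) (fun p => PySem.List.pyGetD p 0 0) false).length_eq
        rw [List.countP_eq_length_filter]
        unfold pvPrep at hlen3
        omega
      have hmn : 1 ≤ m ∧ 1 ≤ n := by
        rcases hpre with h | h | h | ⟨_, h⟩
        · exact absurd (Or.inl h) hg
        · exact absurd (Or.inr (Or.inl h)) hg
        · exact absurd (Or.inr (Or.inr h)) hg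
        · rcases h with h | h
          · exact absurd hcount h
          · exact h
      obtain ⟨hm1, hn1⟩ := hmn
      set M := m.toNat with hMdef
      set N := n.toNat with hNdef
      have hM1 : 1 ≤ M := by omega
      have hN1 : 1 ≤ N := by omega
      set pts := pvPrep points with hptsdef
      set rs := pts.map (fun p => PySem.List.pyGetD p 0 0) with hrsdef
      -- A side
      obtain ⟨SA, _, CA⟩ := pvOuterA_inv M N pts hM1 hN1 hlen3 (N - 1) le_rfl
      have hcastn : ((N - 1 : Nat) : Int) + 1 = n := by omega
      rw [hcastn] at CA
      rw [CA 0 (by omega)]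
      -- B side
      set k := min (n - 1) 3 with hkdef
      have hkcase : k = n - 1 ∨ k = 3 := min_choice _ _
      set K := k.toNat with hKdef
      have hkK : k = (K : Int) := by rcases hkcase with h | h <;> omega
      have hK3 : K ≤ 3 := by rcases hkcase with h | h <;> omega
      have hKN : K ≤ N - 1 := by rcases hkcase with h | h <;> omega
      have hrange0 : PySem.List.pyRange 0 k = (List.range K).map (fun (s : Nat) => (s : Int)) := by
        rw [hkK]
        exact PySem.List.pyRange_zero_natCast K
      rw [hrange0, List.foldl_map]
      have hB := pvForcedB_inv m M hm1 hMdef pts hlen3 K hK3 K le_rfl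
      have hT := pvPyRange_len (N - 1 - K) (k + 1)
      have hcT : (k + 1) + ((N - 1 - K : Nat) : Int) = n := by rw [hkK]; omega
      rw [hcT] at hT
      cases hfold : (List.range K).foldl (fun o (s : Nat) => pvForcedB m pts o (s : Int)) (some 0) with
      | none =>
        have hz := hB.2 hfold
        have hzz := pvColC_zero_propagate hz (N - 1 - K) 0 (by omega)
        have hKe : K + (N - 1 - K) = N - 1 := by omega
        rw [hKe] at hzz
        exact hzz
      | some row =>
        dsimp only
        obtain ⟨hrow0, hrowm, hcol⟩ := hB.1 row hfold
        have hdp0 : ∀ x, x < M →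
            ((List.replicate M (0 : Int)).set row.toNat 1).getD x 0 = pvColC M rs K x := by
          intro x hx
          have hset : ((List.replicate M (0 : Int)).set row.toNat 1).getD x 0 =
              if x = row.toNat then 1 else 0 := by
            rw [List.getD_eq_getElem?_getD, List.getElem?_set]
            rcases eq_or_ne row.toNat x with he | hne
            · rw [if_pos he, if_pos (by simp; omega)]
              simp [he.symm]
            · rw [if_neg hne, if_neg (Ne.symm hne), List.getElem?_replicate]
              split_ifs
              rfl
          rw [hset, hcol x hx]
          split_ifs <;> omega
        by_cases hKeq : 3 ≤ K
        · have hfree := pvFreeB_iter (M := M) (rs := rs) (PySem.List.pyRange (k + 1) n)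
            ((List.replicate M (0 : Int)).set row.toNat 1) K hKeq hdp0 0 (by omega)
          rw [hT] at hfree
          have hKe : K + (N - 1 - K) = N - 1 := by omega
          rw [hKe] at hfree
          rw [PySem.List.pyGetD_zero, hfree]
        · have hKN1 : K = N - 1 := by rcases hkcase with h | h <;> omega
          have hnil : PySem.List.pyRange (k + 1) n = [] :=
            List.eq_nil_of_length_eq_zero (by rw [hT]; omega)
          rw [hnil]
          simp only [List.foldl_nil]
          rw [PySem.List.pyGetD_zero, hdp0 0 (by omega), hKN1]
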